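-- pv_equiv track=rewrite | github.com/Albert-learner/Algorithm | Programmers/LEVEL3/BestOfSet.py | solution_mine
-- ===== SOURCE A (Python) =====
-- def solution_mine(n, s):
--     answer = []
--
--     multi_lst = [i for i in range(1, s)]
--     multi_set = []
--     if len(multi_lst) < 2:
--         answer.append(-1)
--         return answer
--     else:
--         if len(multi_lst) % 2 == 1:
--             for i in range(len(multi_lst) // 2):
--                 two_set = [multi_lst[i], multi_lst[-1 - i]]
--                 multi_set.append(two_set)
--             multi_set.append([multi_lst[len(multi_lst) // 2],
--                               multi_lst[len(multi_lst) // 2]])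
--         else:
--             for i in range(len(multi_lst) // 2):
--                 two_set = [multi_lst[i], multi_lst[-1 - i]]
--                 multi_set.append(two_set)
--
--     multiply_lst = []
--     for x, y in multi_set:
--         multiply = x * y
--         multiply_lst.append(multiply)
--     answer = multi_set[multiply_lst.index(max(multiply_lst))]
--     return answer
-- ===== SOURCE B (Python) =====
-- def solution_mine(n, s):
--     # Closed form: among pairs (x, s-x) with 1 <= x <= s-x <= s-1, the
--     # product x*(s-x) is maximized by the most central pair.
--     if s <= 2:
--         return [-1]
--     h = s // 2
--     if s % 2 == 0:
--         return [h, h]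
--     return [h, h + 1]
-- ===== Notes on version B (the rewrite author's own statement) =====
-- stated objective: faster
-- what changed: Replaces the O(s) construction of all symmetric pairs, their product list and an argmax scan with the O(1) closed-form central pair chosen by the parity of s.
import Mathlib
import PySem

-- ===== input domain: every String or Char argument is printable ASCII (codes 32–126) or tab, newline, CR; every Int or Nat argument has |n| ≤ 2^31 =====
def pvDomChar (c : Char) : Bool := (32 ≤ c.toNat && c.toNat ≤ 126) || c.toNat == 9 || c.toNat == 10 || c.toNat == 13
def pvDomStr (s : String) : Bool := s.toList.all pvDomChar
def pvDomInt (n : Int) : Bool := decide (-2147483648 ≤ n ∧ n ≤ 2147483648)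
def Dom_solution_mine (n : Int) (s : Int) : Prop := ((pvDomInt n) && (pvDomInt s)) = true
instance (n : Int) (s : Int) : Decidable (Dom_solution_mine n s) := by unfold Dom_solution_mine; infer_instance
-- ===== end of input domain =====

-- B replaces A's O(s) pair enumeration + argmax scan by the O(1) central pair chosen by parity of s.

-- ===== PORT A =====
-- Pairs are Python 2-lists [x, y]; modelled as Int × Int (the 'for x, y in multi_set'
-- destructuring), converted back to [x, y] on return.
def solution_mine (n : Int) (s : Int) : List Int :=
  let multi_lst := PySem.List.pyRange 1 s 1
  if multi_lst.length < 2 then [-1]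
  else
    let k : Nat := multi_lst.length / 2   -- len // 2, both nonnegative: Nat division is exact here
    let multi_set : List (Int × Int) :=
      if multi_lst.length % 2 == 1 then
        ((PySem.List.pyRange 0 (k : Int) 1).foldl
          (fun acc i => acc ++ [(PySem.List.pyGetD multi_lst i 0,
                                 PySem.List.pyGetD multi_lst (-1 - i) 0)]) [])
        ++ [(PySem.List.pyGetD multi_lst (k : Int) 0, PySem.List.pyGetD multi_lst (k : Int) 0)]
      else
        (PySem.List.pyRange 0 (k : Int) 1).foldl
          (fun acc i => acc ++ [(PySem.List.pyGetD multi_lst i 0,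
                                 PySem.List.pyGetD multi_lst (-1 - i) 0)]) []
    let multiply_lst : List Int :=
      multi_set.foldl (fun acc xy => acc ++ [xy.1 * xy.2]) []
    -- max(...) and .index(...) raise only on an empty list, unreachable here (len ≥ 2)
    match PySem.List.max? multiply_lst (fun x => x) with
    | none => []
    | some m =>
      match PySem.List.index? multiply_lst m with
      | none => []
      | some idx =>
        let p := PySem.List.pyGetD multi_set (idx : Int) (0, 0)
        [p.1, p.2]

-- ===== PORT B =====
def solution_mine_alt (n : Int) (s : Int) : List Int :=
  if s ≤ 2 then [-1]
  else
    let h := PySem.Int.floordiv s 2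
    if PySem.Int.mod s 2 == 0 then [h, h] else [h, h + 1]

-- ===== PRECONDITION & SPEC =====
def Spec_solution_mine (n : Int) (s : Int) (out : List Int) : Prop := out = solution_mine_alt n s
instance (n : Int) (s : Int) (out : List Int) : Decidable (Spec_solution_mine n s out) := by unfold Spec_solution_mine; infer_instance

-- ===== CLAIM (what is proved, stated in full; the proofs are below) =====
def Claim_equal_solution_mine : Prop := ∀ (n : Int) (s : Int), Dom_solution_mine n s → Spec_solution_mine n s (solution_mine n s)

-- ===== LEMMAS AND PROOFS =====

-- A's tail (max → index → lookup) returns the last pair when its product strictly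
-- dominates every earlier product.
theorem answer_last (pre : List (Int × Int)) (p : Int × Int)
    (h : ∀ q ∈ pre, q.1 * q.2 < p.1 * p.2) :
    (match PySem.List.max? (List.map (fun x => x.1 * x.2) (pre ++ [p])) (fun x => x) with
     | none => ([] : List Int)
     | some m =>
       match PySem.List.index? (List.map (fun x => x.1 * x.2) (pre ++ [p])) m with
       | none => []
       | some idx =>
         [(PySem.List.pyGetD (pre ++ [p]) (idx : Int) (0, 0)).1,
          (PySem.List.pyGetD (pre ++ [p]) (idx : Int) (0, 0)).2]) = [p.1, p.2] := by
  have hfold : List.map (fun x : Int × Int => x.1 * x.2) (pre ++ [p])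
      = pre.map (fun q => q.1 * q.2) ++ [p.1 * p.2] := by simp
  rw [hfold]
  have hnotmem : p.1 * p.2 ∉ pre.map (fun q => q.1 * q.2) := by
    intro hmem
    obtain ⟨q, hq, hval⟩ := List.mem_map.mp hmem
    exact absurd hval (ne_of_lt (h q hq))
  have hmax : PySem.List.max? (pre.map (fun q => q.1 * q.2) ++ [p.1 * p.2]) (fun x => x)
      = some (p.1 * p.2) := by
    rcases hmx : PySem.List.max? (pre.map (fun q => q.1 * q.2) ++ [p.1 * p.2]) (fun x => x) with _ | m
    · exact absurd ((PySem.List.max?_eq_none_iff _ _).mp hmx) (by simp)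
    · have hm_mem := PySem.List.max?_mem hmx
      have hm_max := PySem.List.max?_isMax hmx
      rcases List.mem_append.mp hm_mem with hL | hR
      · obtain ⟨q, hq, hval⟩ := List.mem_map.mp hL
        have h1 : p.1 * p.2 ≤ m := hm_max _ (by simp)
        have h2 : m < p.1 * p.2 := hval ▸ h q hq
        omega
      · simpa using hR
  have hget : PySem.List.pyGetD (pre ++ [p]) ((pre.length : Nat) : Int) ((0 : Int), (0 : Int)) = p := by
    rw [PySem.List.pyGetD_natCast]
    simp [List.getD_eq_getElem?_getD]
  simp only [hmax, PySem.List.index?_append_singleton_self _ _ hnotmem, List.length_map]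
  simp [hget]

-- evaluating A's pair builder: multi_lst[i] and multi_lst[-1-i]
theorem f_eval (s i : Int) (h0 : 0 ≤ i) (h1 : i < s - 1) :
    (PySem.List.pyGetD (PySem.List.pyRange 1 s 1) i 0,
     PySem.List.pyGetD (PySem.List.pyRange 1 s 1) (-1 - i) 0) = (1 + i, s - 1 - i) := by
  have hlen : (PySem.List.pyRange 1 s 1).length = (s - 1).toNat :=
    PySem.List.length_pyRange_one 1 s
  have hfst : PySem.List.pyGetD (PySem.List.pyRange 1 s 1) i 0 = 1 + i := by
    rw [PySem.List.pyGetD_eq_getElem _ _ h0 (by rw [hlen]; omega),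
        PySem.List.getElem_pyRange_one]
    omega
  have hneg : (-1 - i) = -(((i.toNat + 1 : Nat)) : Int) := by push_cast; omega
  have hsnd : PySem.List.pyGetD (PySem.List.pyRange 1 s 1) (-1 - i) 0 = s - 1 - i := by
    rw [hneg, PySem.List.pyGetD_neg_natCast _ _ _ (by omega) (by rw [hlen]; omega),
        PySem.List.getElem_pyRange_one]
    omega
  rw [hfst, hsnd]

-- ===== VERDICT (by name: the statement is the Claim_ definition above) =====
theorem solution_mine_spec : Claim_equal_solution_mine := by
  intro n s _
  unfold Spec_solution_mine solution_mine solution_mine_alt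
  by_cases hs : s ≤ 2
  · have hlen : (PySem.List.pyRange 1 s 1).length < 2 := by
      rw [PySem.List.length_pyRange_one]; omega
    simp [hs]

  · rw [not_le] at hs
    have hlen : (PySem.List.pyRange 1 s 1).length = (s - 1).toNat :=
      PySem.List.length_pyRange_one 1 s
    have hnotlt : ¬ (PySem.List.pyRange 1 s 1).length < 2 := by omega
    have hdiv : PySem.Int.floordiv s 2 = s / 2 :=
      PySem.Int.floordiv_eq_ediv_of_pos (by omega)
    have hmod : PySem.Int.mod s 2 = s % 2 :=
      PySem.Int.mod_eq_emod_of_pos (by omega)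
    simp only [hnotlt, if_false, if_neg (by omega : ¬ s ≤ 2), hdiv, hmod]
    set L : Nat := (PySem.List.pyRange 1 s 1).length with hL
    set k : Nat := L / 2 with hk
    have hLs : (L : Int) = s - 1 := by omega
    have hrange : PySem.List.pyRange 0 (k : Int) 1
        = PySem.List.pyRange 0 ((k : Int) - 1) 1 ++ [(k : Int) - 1] := by
      have hk1 : (1 : Nat) ≤ k := by omega
      have := PySem.List.pyRange_one_succ_right
        (a := 0) (b := (k : Int) - 1) (by omega)
      simpa using this
    by_cases hpar : L % 2 = 1
    · -- odd length: s even, L = 2k+1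
      have hseven : s % 2 = 0 := by omega
      have hs2k : s = 2 * (k : Int) + 2 := by omega
      simp only [hpar, beq_self_eq_true, if_true,
        PySem.List.foldl_append_singleton_eq_map, List.nil_append]
      have hmid : PySem.List.pyGetD (PySem.List.pyRange 1 s 1) ((k : Int)) 0 = 1 + (k : Int) := by
        rw [PySem.List.pyGetD_eq_getElem _ _ (by omega) (by omega),
            PySem.List.getElem_pyRange_one]
        omega
      rw [hmid]
      have hans := answer_last
        ((PySem.List.pyRange 0 ((k : Int)) 1).map
          (fun i => (PySem.List.pyGetD (PySem.List.pyRange 1 s 1) i 0,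
                     PySem.List.pyGetD (PySem.List.pyRange 1 s 1) (-1 - i) 0)))
        (1 + (k : Int), 1 + (k : Int))
        (by
          intro q hq
          obtain ⟨i, hi, rfl⟩ := List.mem_map.mp hq
          obtain ⟨hi0, hik⟩ := PySem.List.mem_pyRange_one.mp hi
          rw [f_eval s i hi0 (by omega)]
          simp only
          nlinarith [mul_pos (show (0:ℤ) < (k : Int) - i by omega)
                             (show (0:ℤ) < (k : Int) - i by omega)])
      refine hans.trans ?_
      have h2 : s / 2 = (k : Int) + 1 := by omega
      simp [hseven, h2]
      omega
    · -- even length: s odd, L = 2k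
      have hsodd : ¬ s % 2 = 0 := by omega
      have hs2k : s = 2 * (k : Int) + 1 := by omega
      simp only [show (L % 2 == 1) = false by simp [hpar], if_false, Bool.false_eq_true,
        PySem.List.foldl_append_singleton_eq_map, List.nil_append]
      rw [hrange, List.map_append]
      have hlast : (fun i => (PySem.List.pyGetD (PySem.List.pyRange 1 s 1) i 0,
                              PySem.List.pyGetD (PySem.List.pyRange 1 s 1) (-1 - i) 0))
            ((k : Int) - 1) = ((k : Int), (k : Int) + 1) := by
        beta_reduce
        rw [f_eval s _ (by omega) (by omega)]
        simp only [Prod.mk.injEq]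
        omega
      simp only [List.map_cons, List.map_nil, hlast]
      have hans := answer_last
        ((PySem.List.pyRange 0 ((k : Int) - 1) 1).map
          (fun i => (PySem.List.pyGetD (PySem.List.pyRange 1 s 1) i 0,
                     PySem.List.pyGetD (PySem.List.pyRange 1 s 1) (-1 - i) 0)))
        ((k : Int), (k : Int) + 1)
        (by
          intro q hq
          obtain ⟨i, hi, rfl⟩ := List.mem_map.mp hq
          obtain ⟨hi0, hik⟩ := PySem.List.mem_pyRange_one.mp hi
          rw [f_eval s i hi0 (by omega)]
          simp only
          nlinarith [mul_pos (show (0:ℤ) < (k : Int) - i by omega)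
                             (show (0:ℤ) < (k : Int) - i - 1 by omega)])
      refine hans.trans ?_
      have h2 : s / 2 = (k : Int) := by omega
      simp [hsodd, h2]
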